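-- pv_equiv track=rewrite | github.com/tr197/Diablo | solution.py | min_gold
-- ===== SOURCE A (Python) =====
-- def min_gold(m, d, k, c):
--     if m == 0:
--         return 0
--     if d < k:
--         return -1  # không g..t được con nào vì kiếm quá yếu
--     if d == k:
--         if m == 1:
--             return 0  # g..t một lần duy nhất -> không cần sửa
--         else:
--             return -1  # không g..t nổi đến con thứ hai
--
--     curent_d = d
--     count_repair = 0
--     while m > 0:
--
--         # sửa
--         if curent_d <= k:
--             curent_d = d
--             count_repair += 1
--
--         # g..t
--         curent_d -= k
--         m -= 1
--     return count_repair * c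
-- ===== SOURCE B (Python) =====
-- def min_gold(m, d, k, c):
--     if m <= 0:
--         return 0
--     if d < k:
--         return -1
--     if d == k:
--         return 0 if m == 1 else -1
--     if k <= 0:
--         return 0  # each strike dulls the blade by k <= 0: it never drops to k, so no repairs
--     kills_per_charge = (d - 1) // k
--     return (m - 1) // kills_per_charge * c
-- ===== Notes on version B (the rewrite author's own statement) =====
-- stated objective: faster
-- what changed: A simulates every strike in a while loop; B computes kills-per-charge as one ceiling division and the repair count by one integer division, no loop.
-- intended difference: For a negative monster count with a sword too weak to kill (m < 0 and d <= k) A returns -1 ('impossible'); B returns 0, the intended answer since no kill is needed and hence no repair is paid. — e.g. on min_gold(-1, 1, 2, 3): A returns -1, B returns 0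
import Mathlib
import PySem

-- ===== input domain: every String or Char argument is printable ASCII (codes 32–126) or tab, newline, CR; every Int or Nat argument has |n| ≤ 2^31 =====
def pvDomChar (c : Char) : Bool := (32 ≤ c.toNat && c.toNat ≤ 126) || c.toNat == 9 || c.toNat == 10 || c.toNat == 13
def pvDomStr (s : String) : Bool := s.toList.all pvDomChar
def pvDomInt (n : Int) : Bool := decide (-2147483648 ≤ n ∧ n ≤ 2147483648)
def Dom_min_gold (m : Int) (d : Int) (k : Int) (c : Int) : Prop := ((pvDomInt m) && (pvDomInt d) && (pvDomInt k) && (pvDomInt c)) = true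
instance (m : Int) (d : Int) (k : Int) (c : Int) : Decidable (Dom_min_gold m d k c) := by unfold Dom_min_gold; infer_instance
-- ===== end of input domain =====

-- B replaces A's kill-by-kill simulation loop with two integer divisions
-- (kills per charge, then repairs); objective: faster (O(1) vs O(m)).

-- ===== PORT A =====
-- while m > 0: repair when curent_d ≤ k, then strike; fuel = m.toNat (loop runs while m > 0)
def min_gold_loop (d k : Int) : Nat → Int → Int → Int
  | 0, _, cnt => cnt
  | n + 1, cd, cnt =>
      if cd ≤ k then min_gold_loop d k n (d - k) (cnt + 1)
      else min_gold_loop d k n (cd - k) cnt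

def min_gold (m : Int) (d : Int) (k : Int) (c : Int) : Int :=
  if m = 0 then 0
  else if d < k then -1
  else if d = k then (if m = 1 then 0 else -1)
  else min_gold_loop d k m.toNat d 0 * c

-- ===== PORT B =====
def min_gold_alt (m : Int) (d : Int) (k : Int) (c : Int) : Int :=
  if m ≤ 0 then 0
  else if d < k then -1
  else if d = k then (if m = 1 then 0 else -1)
  -- each strike dulls the blade by k ≤ 0: it never drops to k, so no repairs
  else if k ≤ 0 then 0
  else
    let kills_per_charge := PySem.Int.floordiv (d - 1) k
    PySem.Int.floordiv (m - 1) kills_per_charge * c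

-- ===== PRECONDITION & SPEC =====
-- For a negative monster count with a sword too weak to kill (m < 0 and d ≤ k) A
-- returns -1 ('impossible'); B returns 0, the intended answer since no kill is
-- needed and hence no repair is paid.
def D_min_gold (m : Int) (d : Int) (k : Int) (c : Int) : Prop := m < 0 ∧ d ≤ k
instance (m : Int) (d : Int) (k : Int) (c : Int) : Decidable (D_min_gold m d k c) := by
  unfold D_min_gold; infer_instance

def Spec_min_gold (m : Int) (d : Int) (k : Int) (c : Int) (out : Int) : Prop := ¬ D_min_gold m d k c → out = min_gold_alt m d k c

def pvDiffWitness_min_gold : Int × Int × Int × Int := (-1, 1, 2, 3)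
def pvDiffWitnessOut_min_gold : Int × Int := (-1, 0)
instance (m : Int) (d : Int) (k : Int) (c : Int) (out : Int) : Decidable (Spec_min_gold m d k c out) := by
  unfold Spec_min_gold; infer_instance

-- ===== CLAIM =====
def Claim_unchanged_min_gold : Prop := ∀ (m : Int) (d : Int) (k : Int) (c : Int),
  Dom_min_gold m d k c → Spec_min_gold m d k c (min_gold m d k c)
def Claim_changed_min_gold : Prop := Dom_min_gold (pvDiffWitness_min_gold.1) (pvDiffWitness_min_gold.2.1) (pvDiffWitness_min_gold.2.2.1) (pvDiffWitness_min_gold.2.2.2) ∧ D_min_gold (pvDiffWitness_min_gold.1) (pvDiffWitness_min_gold.2.1) (pvDiffWitness_min_gold.2.2.1) (pvDiffWitness_min_gold.2.2.2) ∧ min_gold (pvDiffWitness_min_gold.1) (pvDiffWitness_min_gold.2.1) (pvDiffWitness_min_gold.2.2.1) (pvDiffWitness_min_gold.2.2.2) = pvDiffWitnessOut_min_gold.1 ∧ min_gold_alt (pvDiffWitness_min_gold.1) (pvDiffWitness_min_gold.2.1) (pvDiffWitness_min_gold.2.2.1) (pvDiffWitness_min_gold.2.2.2) = pvDiffWitnessOut_min_gold.2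 ∧ pvDiffWitnessOut_min_gold.1 ≠ pvDiffWitnessOut_min_gold.2
def Claim_exact_min_gold : Prop := ∀ (m : Int) (d : Int) (k : Int) (c : Int),
  Dom_min_gold m d k c → D_min_gold m d k c → min_gold m d k c ≠ min_gold_alt m d k c

-- ===== LEMMAS AND PROOFS =====

-- remaining repairs when n monsters are left and j strikes remain on the current charge
def pvR (h : Int) (n : Nat) (j : Int) : Int :=
  if (n : Int) ≤ j then 0 else PySem.Int.floordiv ((n : Int) - j - 1) h + 1

theorem pv_fdiv_zero {a h : Int} (hh : 0 < h) (h0 : 0 ≤ a) (h1 : a < h) :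
    PySem.Int.floordiv a h = 0 := by
  rw [PySem.Int.floordiv_eq_iff_of_pos hh]; constructor <;> omega

theorem pv_fdiv_step {a h : Int} (hh : 0 < h) :
    PySem.Int.floordiv (a + h) h = PySem.Int.floordiv a h + 1 := by
  rw [PySem.Int.floordiv_eq_ediv_of_pos hh, PySem.Int.floordiv_eq_ediv_of_pos hh]
  have := Int.add_mul_ediv_right a 1 (by omega : h ≠ 0)
  simpa using this

theorem pv_loop_inv (d k q : Int) (hk : 0 < k) (hd : k < d)
    (hh1 : d - k ≤ q * k) (hh2 : (q - 1) * k < d - k) :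
    ∀ (n : Nat) (i : Int), 0 ≤ i → i ≤ q → ∀ cnt,
      min_gold_loop d k n (d - i * k) cnt = cnt + pvR q n (q - i) := by
  have hpos : 0 < q := by
    by_contra hc
    push_neg at hc
    have : q * k ≤ 0 * k := mul_le_mul_of_nonneg_right hc (le_of_lt hk)
    simp at this
    linarith
  intro n
  induction n with
  | zero =>
      intro i h0 h1 cnt
      simp only [min_gold_loop, pvR, Nat.cast_zero]
      rw [if_pos (show (0:Int) ≤ q - i by omega)]
      omega
  | succ n ih =>
      intro i h0 h1 cnt
      rcases lt_or_eq_of_le h1 with hlt | heq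
      · -- charge not exhausted: strike without repairing
        have hik : i * k ≤ (q - 1) * k :=
          mul_le_mul_of_nonneg_right (by omega) (by omega)
        have hcd : ¬ d - i * k ≤ k := by nlinarith
        have hnext : d - i * k - k = d - (i + 1) * k := by ring
        rw [min_gold_loop, if_neg hcd, hnext, ih (i + 1) (by omega) (by omega) cnt]
        congr 1
        unfold pvR
        have harg : ((n : Int) + 1) - (q - i) - 1 = (n : Int) - (q - (i + 1)) - 1 := by ring
        push_cast
        split_ifs with c1 c2 c2 <;> first | rfl | omega | (rw [harg])
      · -- charge exhausted: repair, then strike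
        rw [heq]
        have hcd : d - q * k ≤ k := by linarith
        have hst : d - k = d - 1 * k := by ring
        rw [min_gold_loop, if_pos hcd, hst, ih 1 (by omega) (by omega) (cnt + 1)]
        unfold pvR
        push_cast
        split_ifs with c1 c2 c2
        · omega
        · -- n < q, so floordiv n q = 0
          have e0 : ((n:Int) + 1) - (q - q) - 1 = (n : Int) := by ring
          rw [e0, pv_fdiv_zero hpos (by omega) (by omega)]
          ring
        · omega
        · -- n ≥ q: peel one full charge off
          have e1 : ((n:Int) + 1) - (q - q) - 1 = (((n : Int) - (q - 1) - 1) + q) := by ring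
          rw [e1, pv_fdiv_step hpos]
          ring

theorem pv_main (m d k : Int) (hm : 1 ≤ m) (hk : 0 < k) (hd : k < d) :
    min_gold_loop d k m.toNat d 0 =
      PySem.Int.floordiv (m - 1) (PySem.Int.floordiv (d - 1) k) := by
  set q : Int := PySem.Int.floordiv (d - 1) k with hdef
  have hbr : q * k ≤ d - 1 ∧ d - 1 < (q + 1) * k :=
    (PySem.Int.floordiv_eq_iff_of_pos hk).mp hdef.symm
  have hh1 : d - k ≤ q * k := by nlinarith [hbr.2]
  have hh2 : (q - 1) * k < d - k := by nlinarith [hbr.1]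
  have hinv := pv_loop_inv d k q hk hd hh1 hh2 m.toNat 0 (le_refl 0)
      (by nlinarith [hh1]) 0
  simp only [zero_mul, sub_zero, zero_add] at hinv
  rw [hinv]
  have hpos : 0 < q := by nlinarith [hh1]
  have hn : ((m.toNat : Int)) = m := by omega
  unfold pvR
  rw [hn]
  split_ifs with c1
  · rw [pv_fdiv_zero hpos (by omega) (by omega)]
  · have e1 : m - 1 = (m - q - 1) + q := by ring
    rw [e1, pv_fdiv_step hpos]

-- ===== VERDICT =====
-- the loop never repairs when each strike removes k ≤ 0 and the blade starts above k
theorem pv_loop_no_repair (d k : Int) (hk : k ≤ 0) :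
    ∀ (n : Nat) (cd cnt : Int), k < cd → min_gold_loop d k n cd cnt = cnt := by
  intro n
  induction n with
  | zero => intro cd cnt _; rfl
  | succ n ih =>
      intro cd cnt hcd
      simp only [min_gold_loop, if_neg (by omega : ¬ cd ≤ k)]
      exact ih _ _ (by omega)

theorem min_gold_spec : Claim_unchanged_min_gold := by
  intro m d k c _ hnd
  unfold D_min_gold at hnd
  unfold min_gold min_gold_alt
  rcases lt_trichotomy m 0 with hm | hm | hm
  · -- m < 0: ¬D_ forces k < d; A's loop runs zero times, B's guard returns 0
    have hd : k < d := by by_contra h; exact hnd ⟨hm, by omega⟩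
    rw [if_neg (by omega : ¬ m = 0), if_pos (by omega : m ≤ 0),
        if_neg (by omega : ¬ d < k), if_neg (by omega : ¬ d = k)]
    have h0 : m.toNat = 0 := by omega
    rw [h0]
    simp [min_gold_loop]
  · simp [hm]
  · rw [if_neg (by omega : ¬ m = 0), if_neg (by omega : ¬ m ≤ 0)]
    split_ifs with h2 h3 h4 h5 <;> try rfl
    · -- k ≤ 0 < d: the loop never repairs, so A returns 0 * c = 0
      rw [pv_loop_no_repair d k h5 _ d 0 (by omega)]; ring
    · rw [pv_main m d k (by omega) (by omega) (by omega)]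

theorem min_gold_changed : Claim_changed_min_gold := by
  unfold Claim_changed_min_gold; decide

theorem min_gold_tight : Claim_exact_min_gold := by
  intro m d k c _ hd
  obtain ⟨hm, hdk⟩ := hd
  unfold min_gold min_gold_alt
  rw [if_neg (by omega : ¬ m = 0), if_pos (by omega : m ≤ 0)]
  rcases lt_or_eq_of_le hdk with h | h
  · rw [if_pos h]; decide
  · rw [if_neg (by omega : ¬ d < k), if_pos h, if_neg (by omega : ¬ m = 1)]; decide
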